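-- pv_equiv track=rewrite | github.com/shivesh-ganju/Hidden-Markov-Model-Viterbi | preprocessing.py | createSuffixDict
-- ===== SOURCE A (Python) =====
-- def createSuffixDict(words,tag):
-- 	suffix={}
-- 	suffix_length=20
-- 	for i in range(0,len(words)):
-- 		for j in range(2,suffix_length+1):
-- 			suffix1=""
-- 			if len(words[i])>j-1:
-- 				suffix1=words[i][len(words[i])-j:]
-- 			if suffix1 in suffix:
-- 				if tag[i] in suffix[suffix1]:
-- 					suffix[suffix1][tag[i]]=suffix[suffix1][tag[i]]+1
-- 				else:
-- 					suffix[suffix1][tag[i]]=1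
-- 			else:
-- 				suffix[suffix1]={tag[i]:1}
-- 	return suffix
-- ===== SOURCE B (Python) =====
-- def createSuffixDict(words, tag):
--     groups = {}
--     for i in range(len(words)):
--         w = words[i]
--         t = tag[i]
--         L = len(w)
--         for j in range(2, 21):
--             s = w[L - j:] if L > j - 1 else ""
--             groups.setdefault(s, []).append(t)
--     result = {}
--     for s, ts in groups.items():
--         counts = {}
--         for t in ts:
--             counts[t] = counts.get(t, 0) + 1
--         result[s] = counts
--     return result
-- ===== Notes on version B (the rewrite author's own statement) =====
-- stated objective: alternative
-- what changed: Replaces A's per-occurrence update of a nested dict-of-dicts (membership tests and in-place counter bumps for every (suffix, tag) pair) with a two-phase pipeline: first group all tag occurrences into lists keyed by suffix, then build the nested result by counting each group's tags in a separate pass.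
import Mathlib
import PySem

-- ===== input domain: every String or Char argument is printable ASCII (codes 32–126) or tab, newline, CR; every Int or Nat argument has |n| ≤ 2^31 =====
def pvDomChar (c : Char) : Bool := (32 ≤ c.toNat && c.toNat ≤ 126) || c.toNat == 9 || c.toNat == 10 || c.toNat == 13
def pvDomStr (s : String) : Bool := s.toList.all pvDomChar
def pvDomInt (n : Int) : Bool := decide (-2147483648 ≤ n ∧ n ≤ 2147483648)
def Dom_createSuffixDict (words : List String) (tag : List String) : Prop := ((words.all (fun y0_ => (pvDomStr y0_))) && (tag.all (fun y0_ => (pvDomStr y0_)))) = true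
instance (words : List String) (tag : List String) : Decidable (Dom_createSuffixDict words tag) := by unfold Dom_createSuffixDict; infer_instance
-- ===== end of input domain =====

-- B replaces A's per-occurrence nested dict-of-dicts update by a two-phase pipeline (group tags by suffix, then count each group); alternative decomposition, same cost.

-- ===== PORT A =====
def createSuffixDict (words : List String) (tag : List String) : List (String × List (String × Int)) :=
  let suffix : PySem.Dict String (PySem.Dict String Int) :=
    (PySem.List.pyRange 0 (words.length : Int) 1).foldl (fun suffix i =>
      (PySem.List.pyRange 2 (20 + 1) 1).foldl (fun suffix j =>
        let suffix1 : String :=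
          if (PySem.Str.len (PySem.List.pyGetD words i "")) > j - 1 then
            PySem.Str.slice (PySem.List.pyGetD words i "")
              (some ((PySem.Str.len (PySem.List.pyGetD words i "")) - j)) none
          else ""
        match suffix.get? suffix1 with
        | some inner =>
          if inner.contains (PySem.List.pyGetD tag i "") then
            suffix.insert suffix1
              (inner.insert (PySem.List.pyGetD tag i "")
                (inner.getD (PySem.List.pyGetD tag i "") 0 + 1))
          else
            suffix.insert suffix1 (inner.insert (PySem.List.pyGetD tag i "") 1)
        | none => suffix.insert suffix1 (PySem.Dict.ofList [(PySem.List.pyGetD tag i "", 1)])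
        ) suffix) PySem.Dict.empty
  suffix.items.map (fun p => (p.1, p.2.items))

-- ===== PORT B =====
def createSuffixDict_alt (words : List String) (tag : List String) : List (String × List (String × Int)) :=
  let groups : PySem.Dict String (List String) :=
    (PySem.List.pyRange 0 (words.length : Int) 1).foldl (fun groups i =>
      let w := PySem.List.pyGetD words i ""
      let t := PySem.List.pyGetD tag i ""
      let L := PySem.Str.len w
      (PySem.List.pyRange 2 21 1).foldl (fun groups j =>
        groups.modify (if L > j - 1 then PySem.Str.slice w (some (L - j)) none else "") []
          (fun ts => ts ++ [t])) groups) PySem.Dict.empty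
  let result : PySem.Dict String (PySem.Dict String Int) :=
    groups.items.foldl (fun result st =>
      result.insert st.1
        (st.2.foldl (fun counts t => counts.insert t (counts.getD t 0 + 1)) PySem.Dict.empty))
      PySem.Dict.empty
  result.items.map (fun p => (p.1, p.2.items))

-- ===== PRECONDITION & SPEC =====
-- Pre_ excludes exactly the inputs where Python raises IndexError (tag shorter than words).
def Pre_createSuffixDict (words : List String) (tag : List String) : Prop :=
  words.length ≤ tag.length
instance (words : List String) (tag : List String) : Decidable (Pre_createSuffixDict words tag) := by
  unfold Pre_createSuffixDict; infer_instance

def pvWitness_createSuffixDict : List String × List String := (["ab", "x"], ["NN", "VB"])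

def Spec_createSuffixDict (words : List String) (tag : List String) (out : List (String × List (String × Int))) : Prop := out = createSuffixDict_alt words tag
instance (words : List String) (tag : List String) (out : List (String × List (String × Int))) : Decidable (Spec_createSuffixDict words tag out) := by unfold Spec_createSuffixDict; infer_instance

-- ===== CLAIM (what is proved, stated in full; the proofs are below) =====
def Claim_equal_createSuffixDict : Prop := ∀ (words : List String) (tag : List String), Dom_createSuffixDict words tag → Pre_createSuffixDict words tag → Spec_createSuffixDict words tag (createSuffixDict words tag)

-- ===== LEMMAS AND PROOFS =====

-- the (suffix, tag) pair processed at word index i, suffix length j (common to both Pythons)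
def pvPair (words tag : List String) (i j : Int) : String × String :=
  ((if (PySem.Str.len (PySem.List.pyGetD words i "")) > j - 1 then
      PySem.Str.slice (PySem.List.pyGetD words i "")
        (some ((PySem.Str.len (PySem.List.pyGetD words i "")) - j)) none
    else ""), PySem.List.pyGetD tag i "")

def pvPairs (words tag : List String) : List (String × String) :=
  (PySem.List.pyRange 0 (words.length : Int) 1).flatMap
    (fun i => (PySem.List.pyRange 2 21 1).map (pvPair words tag i))

-- A's per-pair update, in uniform form
def pvStepU (d : PySem.Dict String (PySem.Dict String Int)) (p : String × String) :
    PySem.Dict String (PySem.Dict String Int) :=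
  d.insert p.1
    ((d.getD p.1 PySem.Dict.empty).insert p.2 ((d.getD p.1 PySem.Dict.empty).getD p.2 0 + 1))

-- a nested loop over i, j is a flat fold over the pair list
theorem pvNestfold {α β γ δ : Type} (xs : List α) (ys : List β) (g : δ → γ → δ)
    (f : α → β → γ) (a0 : δ) :
    xs.foldl (fun a i => ys.foldl (fun a j => g a (f i j)) a) a0
      = (xs.flatMap (fun i => ys.map (f i))).foldl g a0 := by
  induction xs generalizing a0 with
  | nil => rfl
  | cons x xs ih => simp [List.foldl_append, List.foldl_map, ih]

theorem pvStepA_eq (d : PySem.Dict String (PySem.Dict String Int)) (s t : String) :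
    (match d.get? s with
     | some inner =>
        if inner.contains t then d.insert s (inner.insert t (inner.getD t 0 + 1))
        else d.insert s (inner.insert t 1)
     | none => d.insert s (PySem.Dict.ofList [(t, 1)])) = pvStepU d (s, t) := by
  cases h : d.get? s with
  | none =>
      simp only [pvStepU, PySem.Dict.getD_eq_get?_getD, h, Option.getD_none]
      norm_num [PySem.Dict.getD_empty]
      rfl
  | some inner =>
      simp only [pvStepU, PySem.Dict.getD_eq_get?_getD, h, Option.getD_some]
      by_cases hc : inner.contains t
      · simp [hc]
      · have h0 : inner.get? t = none := by
          rw [PySem.Dict.get?_eq_none_iff_contains]; simpa using hc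
        simp [hc, h0]

theorem pvA_eq (words tag : List String) :
    createSuffixDict words tag
      = ((pvPairs words tag).foldl pvStepU PySem.Dict.empty).items.map (fun p => (p.1, p.2.items)) := by
  have hfun : (fun (suffix : PySem.Dict String (PySem.Dict String Int)) (i : Int) =>
      (PySem.List.pyRange 2 (20 + 1) 1).foldl (fun suffix j =>
        let suffix1 : String :=
          if (PySem.Str.len (PySem.List.pyGetD words i "")) > j - 1 then
            PySem.Str.slice (PySem.List.pyGetD words i "")
              (some ((PySem.Str.len (PySem.List.pyGetD words i "")) - j)) none
          else ""
        match suffix.get? suffix1 with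
        | some inner =>
          if inner.contains (PySem.List.pyGetD tag i "") then
            suffix.insert suffix1
              (inner.insert (PySem.List.pyGetD tag i "")
                (inner.getD (PySem.List.pyGetD tag i "") 0 + 1))
          else
            suffix.insert suffix1 (inner.insert (PySem.List.pyGetD tag i "") 1)
        | none => suffix.insert suffix1 (PySem.Dict.ofList [(PySem.List.pyGetD tag i "", 1)])
        ) suffix)
      = (fun suffix i => (PySem.List.pyRange 2 21 1).foldl
          (fun a j => pvStepU a (pvPair words tag i j)) suffix) := by
    funext d i
    refine congrArg (fun f => List.foldl f d (PySem.List.pyRange 2 21 1)) ?_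
    funext a j
    exact pvStepA_eq a _ _
  unfold createSuffixDict
  rw [hfun, pvNestfold]
  rfl

theorem pvB_eq (words tag : List String) :
    createSuffixDict_alt words tag
      = (((pvPairs words tag).foldl
            (fun g (p : String × String) => g.modify p.1 [] (fun ts => ts ++ [p.2]))
            PySem.Dict.empty).items.foldl (fun r st =>
              r.insert st.1
                (st.2.foldl (fun c t => c.insert t (c.getD t 0 + 1)) PySem.Dict.empty))
            PySem.Dict.empty).items.map (fun p => (p.1, p.2.items)) := by
  unfold createSuffixDict_alt pvPairs
  rw [← pvNestfold (PySem.List.pyRange 0 (words.length : Int) 1) (PySem.List.pyRange 2 21 1)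
        (fun (g : PySem.Dict String (List String)) (p : String × String) =>
          g.modify p.1 [] (fun ts => ts ++ [p.2])) (pvPair words tag) PySem.Dict.empty]
  rfl

theorem pvFold_getD (ps : List (String × String)) (d : PySem.Dict String (PySem.Dict String Int))
    (s : String) :
    (ps.foldl pvStepU d).getD s PySem.Dict.empty
      = ((ps.filter (fun p => p.1 == s)).map Prod.snd).foldl
          (fun c t => c.insert t (c.getD t 0 + 1)) (d.getD s PySem.Dict.empty) := by
  induction ps generalizing d with
  | nil => rfl
  | cons p ps ih =>
    rw [List.foldl_cons, ih]
    by_cases hp : p.1 = s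
    · rw [List.filter_cons_of_pos (by simpa using hp), List.map_cons, List.foldl_cons]
      congr 1
      subst hp
      simp [pvStepU, PySem.Dict.getD_insert_self]
    · rw [List.filter_cons_of_neg (by simpa using hp)]
      congr 1
      simp only [pvStepU]
      exact PySem.Dict.getD_insert_of_ne _ _ _ (Ne.symm hp)

theorem pvMain (ps : List (String × String)) :
    ((ps.foldl pvStepU PySem.Dict.empty).items
      = ((ps.foldl (fun g (p : String × String) => g.modify p.1 [] (fun ts => ts ++ [p.2]))
            PySem.Dict.empty).items.foldl (fun r st =>
              r.insert st.1
                (st.2.foldl (fun c t => c.insert t (c.getD t 0 + 1)) PySem.Dict.empty))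
            PySem.Dict.empty).items) := by
  set DA := ps.foldl pvStepU PySem.Dict.empty with hDA
  set G := ps.foldl (fun g (p : String × String) => g.modify p.1 [] (fun ts => ts ++ [p.2]))
      PySem.Dict.empty with hG
  have hpv : pvStepU = (fun d (x : String × String) =>
      d.insert x.1 ((d.getD x.1 PySem.Dict.empty).insert x.2
        ((d.getD x.1 PySem.Dict.empty).getD x.2 0 + 1))) := rfl
  have hkA : DA.keys = PySem.Set.ofList (ps.map Prod.fst) := by
    rw [hDA, hpv]
    have := PySem.Dict.keys_foldl_insert_key ps Prod.fst
      (fun (d : PySem.Dict String (PySem.Dict String Int)) (p : String × String) =>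
        (d.getD p.1 PySem.Dict.empty).insert p.2 ((d.getD p.1 PySem.Dict.empty).getD p.2 0 + 1))
      PySem.Dict.empty
    rw [PySem.Dict.keys_empty, PySem.Set.update_nil_left] at this
    exact this
  have hnA : DA.keys.Nodup := by
    rw [hDA, hpv]
    exact PySem.Dict.nodup_keys_foldl_insert_key ps Prod.fst _ _ (by simp [PySem.Dict.keys_empty])
  have hkG : G.keys = PySem.Set.ofList (ps.map Prod.fst) := by
    rw [hG]
    have := PySem.Dict.keys_foldl_modify_key ps Prod.fst []
      (fun _ (p : String × String) ts => ts ++ [p.2]) PySem.Dict.empty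
    rw [PySem.Dict.keys_empty, PySem.Set.update_nil_left] at this
    exact this
  have hnG : G.keys.Nodup := by
    rw [hG]
    exact PySem.Dict.nodup_keys_foldl_modify_key ps Prod.fst [] _ _ (by simp [PySem.Dict.keys_empty])
  have hGv : ∀ s, G.getD s [] = (ps.filter (fun p => p.1 == s)).map Prod.snd := by
    intro s
    rw [hG, PySem.Dict.getD_foldl_modify_append, PySem.Dict.getD_empty, List.nil_append]
  have hAv : ∀ s, DA.getD s PySem.Dict.empty
      = ((ps.filter (fun p => p.1 == s)).map Prod.snd).foldl
          (fun c t => c.insert t (c.getD t 0 + 1)) PySem.Dict.empty := by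
    intro s
    rw [hDA, pvFold_getD, PySem.Dict.getD_empty]
  have hR : ((G.items.foldl (fun r st =>
        r.insert st.1 (st.2.foldl (fun c t => c.insert t (c.getD t 0 + 1)) PySem.Dict.empty))
        PySem.Dict.empty) : PySem.Dict String (PySem.Dict String Int)).items
      = G.items.map (fun st =>
          (st.1, st.2.foldl (fun c t => c.insert t (c.getD t 0 + 1)) PySem.Dict.empty)) := by
    have := PySem.Dict.items_foldl_insert_fresh G.items Prod.fst
      (fun st => st.2.foldl (fun (c : PySem.Dict String Int) t => c.insert t (c.getD t 0 + 1))
        PySem.Dict.empty)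
      PySem.Dict.empty (fun a _ => by simp [PySem.Dict.contains_empty]) hnG
    simpa using this
  rw [hR, PySem.Dict.items_eq_map_keys DA hnA PySem.Dict.empty,
      PySem.Dict.items_eq_map_keys G hnG [], List.map_map, hkA, hkG]
  refine List.map_congr_left ?_
  intro s _
  simp only [Function.comp]
  rw [hAv s, hGv s]

-- ===== VERDICT (by name: the statement is the Claim_ definition above) =====
theorem createSuffixDict_spec : Claim_equal_createSuffixDict := by
  intro words tag _ _
  unfold Spec_createSuffixDict
  rw [pvA_eq, pvB_eq, pvMain]
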